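-- pv_equiv track=rewrite | github.com/Wikidata/StrepHit | strephit/commons/serialize.py | map_url_to_wid
-- ===== SOURCE A (Python) =====
-- def map_url_to_wid(semistructured):
--     """ Read the quick statements generated from the semi structured data
--         and build a map associating url to wikidata id
--     """
--
--     # urls are not primary keys, so skip urls with more than one subject
--     banned_urls = set()
--
--     url_to_wid = {}
--     for row in semistructured:
--         parts = row[:-1].split('\t')
--         wid, url = parts[0], parts[-1]
--         if url in url_to_wid and url_to_wid[url] != wid:
--             url_to_wid.pop(url)
--             banned_urls.add(url)
--         elif url not in banned_urls:
--             url_to_wid[parts[-1]] = parts[0]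
--
--     return url_to_wid
-- ===== SOURCE B (Python) =====
-- def map_url_to_wid(semistructured):
--     """ Read the quick statements generated from the semi structured data
--         and build a map associating url to wikidata id
--     """
--     # first pass: group the distinct wids seen for each url
--     wids_by_url = {}
--     for row in semistructured:
--         parts = row[:-1].split('\t')
--         wid, url = parts[0], parts[-1]
--         wids_by_url.setdefault(url, set()).add(wid)
--     # urls are not primary keys: keep only urls with exactly one wid
--     return {url: next(iter(wids)) for url, wids in wids_by_url.items() if len(wids) == 1}
-- ===== Notes on version B (the rewrite author's own statement) =====
-- stated objective: simpler
-- what changed: A interleaves a mutable dict and a ban-set with pop/ban bookkeeping in one loop; B first groups the distinct wids seen per url into a dict of sets, then keeps exactly the urls with a single wid via a comprehension.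
import Mathlib
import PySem

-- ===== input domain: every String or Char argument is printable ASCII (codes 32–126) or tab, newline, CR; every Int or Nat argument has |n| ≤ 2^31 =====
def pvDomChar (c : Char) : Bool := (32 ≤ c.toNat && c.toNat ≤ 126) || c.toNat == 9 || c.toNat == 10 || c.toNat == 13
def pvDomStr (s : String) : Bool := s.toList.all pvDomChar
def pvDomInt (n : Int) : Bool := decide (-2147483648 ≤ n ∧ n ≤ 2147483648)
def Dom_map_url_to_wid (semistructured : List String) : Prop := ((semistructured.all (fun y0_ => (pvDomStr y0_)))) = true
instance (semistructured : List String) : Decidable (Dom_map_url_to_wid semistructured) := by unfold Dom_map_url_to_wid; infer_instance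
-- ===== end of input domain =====

-- B replaces A's interleaved dict+ban-set loop by a group-then-filter decomposition (objective: simpler); same return value.

-- shared parsing helper: wid, url = row[:-1].split('\t')[0], row[:-1].split('\t')[-1]
-- split('\t') always returns a nonempty list, so the pyGetD defaults are never used (no IndexError).
def pvParseRow (row : String) : String × String :=
  let parts := (PySem.Str.split? (PySem.Str.slice row none (some (-1))) "\t").getD []
  (PySem.List.pyGetD parts 0 "", PySem.List.pyGetD parts (-1) "")

-- ===== PORT A =====
-- A-side helper: the body of A's for-loop, state = (banned_urls, url_to_wid)
def pvStepA (st : PySem.Set String × PySem.Dict String String) (row : String) :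
    PySem.Set String × PySem.Dict String String :=
  let banned := st.1
  let d := st.2
  let (wid, url) := pvParseRow row
  if d.contains url && !(d.getD url "" == wid) then
    (PySem.Set.add banned url, d.erase url)
  else if !(PySem.Set.contains banned url) then
    (banned, d.insert url wid)
  else
    (banned, d)

def map_url_to_wid (semistructured : List String) : List (String × String) :=
  (semistructured.foldl pvStepA (PySem.Set.empty, PySem.Dict.empty)).2.items

-- ===== PORT B =====
-- B-side helper: the body of B's grouping loop: wids_by_url.setdefault(url, set()).add(wid)
def pvStepB (m : PySem.Dict String (PySem.Set String)) (row : String) :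
    PySem.Dict String (PySem.Set String) :=
  let (wid, url) := pvParseRow row
  m.modify url PySem.Set.empty (fun s => PySem.Set.add s wid)

def map_url_to_wid_alt (semistructured : List String) : List (String × String) :=
  let seen := semistructured.foldl pvStepB PySem.Dict.empty
  -- dict comprehension over seen.items: exact as filterMap because a dict's keys are distinct
  seen.items.filterMap (fun p => if p.2.length = 1 then some (p.1, p.2.headD "") else none)

-- ===== PRECONDITION & SPEC =====
def Spec_map_url_to_wid (semistructured : List String) (out : List (String × String)) : Prop := out = map_url_to_wid_alt semistructured
instance (semistructured : List String) (out : List (String × String)) : Decidable (Spec_map_url_to_wid semistructured out) := by unfold Spec_map_url_to_wid; infer_instance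

-- ===== CLAIM (what is proved, stated in full; the proofs are below) =====
def Claim_equal_map_url_to_wid : Prop := ∀ (semistructured : List String), Dom_map_url_to_wid semistructured → Spec_map_url_to_wid semistructured (map_url_to_wid semistructured)

-- ===== LEMMAS AND PROOFS =====

-- the comprehension's selector, as a named function for the proofs
def pvSel (p : String × PySem.Set String) : Option (String × String) :=
  if p.2.length = 1 then some (p.1, p.2.headD "") else none

lemma pvSel_key {p : String × PySem.Set String} {q : String × String}
    (h : pvSel p = some q) : q.1 = p.1 := by
  unfold pvSel at h
  split at h
  · cases h; rfl
  · cases h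

lemma pvSel_singleton (k w : String) : pvSel (k, [w]) = some (k, w) := rfl

lemma pvSel_none_of_two {s : PySem.Set String} (h : 2 ≤ s.length) (k : String) :
    pvSel (k, s) = none := by
  have hne : ¬ ((k, s).2.length = 1) := by simp only; omega
  simp only [pvSel, if_neg hne]

-- keys of the filterMap output form a sublist of the input keys
lemma pvKeys_sublist (l : List (String × PySem.Set String)) :
    ((l.filterMap pvSel).map Prod.fst).Sublist (l.map Prod.fst) := by
  induction l with
  | nil => simp
  | cons p t ih =>
    cases hsel : pvSel p with
    | none => simpa [hsel] using ih.cons _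
    | some q =>
      have hk := pvSel_key hsel
      simpa [hsel, hk] using List.Sublist.cons₂ p.1 ih

-- replacement at key k is the identity when the only key-k entry is already (k, v)
lemma pvReplace_id {α : Type} (l : List (String × α)) (k : String) (v : α)
    (h : ∀ p ∈ l, p.1 = k → p = (k, v)) :
    l.map (fun p => if p.1 == k then (k, v) else p) = l := by
  have : ∀ p ∈ l, (fun p => if p.1 == k then (k, v) else p) p = p := by
    intro p hp
    by_cases hk : p.1 = k
    · simp [h p hp hk]
    · simp [hk]
  rw [List.map_congr_left this]
  exact List.map_id l

-- no entry with key k: the replacement map is the identity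
lemma pvReplace_noop {α : Type} (l : List (String × α)) (k : String) (v : α)
    (h : ∀ p ∈ l, p.1 ≠ k) :
    l.map (fun p => if p.1 == k then (k, v) else p) = l := by
  have : ∀ p ∈ l, (fun p => if p.1 == k then (k, v) else p) p = p := by
    intro p hp; simp [h p hp]
  rw [List.map_congr_left this]
  exact List.map_id l

-- a filter on a key no entry has is the identity
lemma pvFilter_noop {α : Type} (l : List (String × α)) (k : String)
    (h : ∀ q ∈ l, q.1 ≠ k) : l.filter (fun q => !(q.1 == k)) = l :=
  List.filter_eq_self.mpr (fun q hq => by simp [h q hq])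

-- every key of the comprehension output is a key of the input
lemma pvKeys_mem {l : List (String × PySem.Set String)} {q : String × String}
    (hq : q ∈ l.filterMap pvSel) : q.1 ∈ l.map Prod.fst :=
  (pvKeys_sublist l).subset (List.mem_map_of_mem hq)

-- in-place replacement of the (unique) key-k entry by one the selector drops
lemma pvFilterMap_replace_none (l : List (String × PySem.Set String)) (k : String)
    (s' : PySem.Set String) (hnd : (l.map Prod.fst).Nodup) (hsel : pvSel (k, s') = none) :
    (l.map (fun p => if p.1 == k then (k, s') else p)).filterMap pvSel
      = (l.filterMap pvSel).filter (fun q => !(q.1 == k)) := by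
  induction l with
  | nil => simp
  | cons p t ih =>
    have hnd' : (t.map Prod.fst).Nodup := (List.nodup_cons.mp hnd).2
    have hpn : p.1 ∉ t.map Prod.fst := (List.nodup_cons.mp hnd).1
    by_cases hp : p.1 = k
    · have hhead : (if p.1 == k then (k, s') else p) = (k, s') := by simp [hp]
      have hno : ∀ q ∈ t, q.1 ≠ k := by
        intro q hq hqk
        exact hpn (by rw [hp, ← hqk]; exact List.mem_map_of_mem hq)
      have h1 : (t.map (fun p => if p.1 == k then (k, s') else p)) = t :=
        pvReplace_noop t k s' hno
      have h2 : ∀ q ∈ t.filterMap pvSel, q.1 ≠ k := by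
        intro q hq hqk
        obtain ⟨r, hr, hrk⟩ := List.mem_map.mp (hqk ▸ pvKeys_mem hq)
        exact hno r hr hrk
      rw [List.map_cons, hhead, List.filterMap_cons_none hsel, h1]
      cases hq : pvSel p with
      | none => rw [List.filterMap_cons_none hq, pvFilter_noop _ k h2]
      | some q =>
        have hqk : q.1 = k := by rw [pvSel_key hq, hp]
        rw [List.filterMap_cons_some hq, List.filter_cons_of_neg (by simp [hqk]),
          pvFilter_noop _ k h2]
    · have hhead : (if p.1 == k then (k, s') else p) = p := by simp [hp]
      rw [List.map_cons, hhead]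
      cases hq : pvSel p with
      | none => rw [List.filterMap_cons_none hq, List.filterMap_cons_none hq, ih hnd']
      | some q =>
        have hqk : q.1 ≠ k := by rw [pvSel_key hq]; exact hp
        rw [List.filterMap_cons_some hq, List.filterMap_cons_some hq,
          List.filter_cons_of_pos (by simp [hqk]), ih hnd']

-- a dict that does not contain k has no key-k item
lemma pvNoKey {ν : Type} (d : PySem.Dict String ν) (k : String)
    (h : d.contains k = false) : ∀ p ∈ d.items, p.1 ≠ k := by
  intro p hp hk
  have : d.items.any (fun p => p.1 == k) = true :=
    List.any_eq_true.mpr ⟨p, hp, by simp [hk]⟩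
  rw [show d.items.any (fun p => p.1 == k) = d.contains k from rfl, h] at this
  cases this

-- the loop invariant tying A's state to B's
def pvInv (banned : PySem.Set String) (d : PySem.Dict String String)
    (m : PySem.Dict String (PySem.Set String)) : Prop :=
  m.keys.Nodup ∧
  (∀ p ∈ m.items, p.2 ≠ ([] : List String)) ∧
  (∀ u : String, u ∈ banned ↔ ∃ s, m.get? u = some s ∧ 2 ≤ s.length) ∧
  d.items = m.items.filterMap pvSel

lemma pvStep_inv (banned : PySem.Set String) (d : PySem.Dict String String)
    (m : PySem.Dict String (PySem.Set String)) (row : String)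
    (h : pvInv banned d m) :
    pvInv (pvStepA (banned, d) row).1 (pvStepA (banned, d) row).2 (pvStepB m row) := by
  obtain ⟨hnd, hne, hban, hd⟩ := h
  have hmk : m.keys = m.items.map Prod.fst := by simp [PySem.Dict.keys]
  have hndm : (m.items.map Prod.fst).Nodup := hmk ▸ hnd
  have hdkeys : d.keys.Nodup := by
    have hk : d.keys = (m.items.filterMap pvSel).map Prod.fst := by
      simp [PySem.Dict.keys, hd]
    rw [hk]
    exact (pvKeys_sublist m.items).nodup hndm
  rcases hpr : pvParseRow row with ⟨wid, url⟩
  cases hmu : m.get? url with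
  | none =>
    -- url never seen: A inserts url↦wid, B starts the set {wid}
    have hmnc : m.contains url = false := by
      rw [PySem.Dict.contains_eq_isSome_get?, hmu]; rfl
    have hdnc : d.contains url = false := by
      rw [PySem.Dict.contains_eq_isSome_get?]
      cases hdg : d.get? url with
      | none => rfl
      | some w =>
        exfalso
        have hmem : (url, w) ∈ d.items := PySem.Dict.mem_items_of_get?_eq_some d hdg
        obtain ⟨p, hp, hpk⟩ := List.mem_map.mp (pvKeys_mem (hd ▸ hmem))
        have h2 := PySem.Dict.get?_of_mem_items m
          (show (p.1, p.2) ∈ m.items by simpa using hp) hnd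
        rw [hpk, hmu] at h2; cases h2
    have hbf : url ∉ banned := by
      rw [hban]; rintro ⟨s, hs, -⟩; rw [hmu] at hs; cases hs
    have hgd : m.getD url ([] : List String) = ([] : List String) := by
      simp [PySem.Dict.getD, hmu]
    have hA : pvStepA (banned, d) row = (banned, d.insert url wid) := by
      simp [pvStepA, hpr, hdnc, hbf]
    have hB : pvStepB m row = m.insert url [wid] := by
      simp [pvStepB, hpr, PySem.Dict.modify, hgd, PySem.Set.add, PySem.Set.contains]
    rw [hA, hB]
    refine ⟨PySem.Dict.nodup_keys_insert m url [wid] hnd, ?_, ?_, ?_⟩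
    · intro p hp
      rw [PySem.Dict.items_insert_of_not_contains m [wid] hmnc] at hp
      rcases List.mem_append.mp hp with hp | hp
      · exact hne p hp
      · rw [List.mem_singleton.mp hp]; simp
    · intro u
      by_cases hu : u = url
      · subst hu
        constructor
        · intro hub; exact absurd hub hbf
        · rintro ⟨s, hs, hlen⟩
          rw [PySem.Dict.get?_insert m u u [wid], if_pos rfl] at hs
          cases hs; simp at hlen
      · rw [hban u, PySem.Dict.get?_insert_of_ne m [wid] hu]
    · rw [PySem.Dict.items_insert_of_not_contains d wid hdnc,
        PySem.Dict.items_insert_of_not_contains m [wid] hmnc,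
        List.filterMap_append, hd]
      simp [pvSel_singleton url wid]
  | some s =>
    have hsmem : (url, s) ∈ m.items :=
      (PySem.Dict.get?_eq_some_iff_mem_items m url s hnd).mp hmu
    have hmc : m.contains url = true := by
      rw [PySem.Dict.contains_eq_isSome_get?, hmu]; rfl
    have hgd : m.getD url ([] : List String) = s := by simp [PySem.Dict.getD, hmu]
    have hmuniq : ∀ p ∈ m.items, p.1 = url → p = (url, s) := by
      intro p hp hpk
      have h2 := PySem.Dict.get?_of_mem_items m
        (show (p.1, p.2) ∈ m.items by simpa using hp) hnd
      rw [hpk] at h2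
      have h3 : p.2 = s := Option.some.inj (h2.symm.trans hmu)
      obtain ⟨a, b⟩ := p
      simp only at hpk h3
      rw [hpk, h3]
    match s, hsmem, hgd, hmuniq, hmu with
    | [], hsmem, _, _, _ => exact absurd rfl (hne _ hsmem)
    | [w], hsmem, hgd, hmuniq, hmu =>
      -- url currently mapped to the single wid w
      have hbf : url ∉ banned := by
        rw [hban]; rintro ⟨s', hs', hlen⟩
        rw [hmu] at hs'; cases hs'; simp at hlen
      have hdmem : (url, w) ∈ d.items := by
        rw [hd]
        exact List.mem_filterMap.mpr ⟨(url, [w]), hsmem, pvSel_singleton url w⟩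
      have hdg : d.get? url = some w := PySem.Dict.get?_of_mem_items d hdmem hdkeys
      have hdc : d.contains url = true := by
        rw [PySem.Dict.contains_eq_isSome_get?, hdg]; rfl
      have hdgd : d.getD url "" = w := by simp [PySem.Dict.getD, hdg]
      by_cases hw : w = wid
      · -- same wid again: both dicts are unchanged
        subst hw
        have hm' : m.insert url [w] = m := by
          apply PySem.Dict.ext
          rw [PySem.Dict.items_insert_of_contains m [w] hmc]
          exact pvReplace_id m.items url [w] hmuniq
        have hduniq : ∀ p ∈ d.items, p.1 = url → p = (url, w) := by
          intro p hp hpk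
          have h2 := PySem.Dict.get?_of_mem_items d
            (show (p.1, p.2) ∈ d.items by simpa using hp) hdkeys
          rw [hpk] at h2
          have h3 : p.2 = w := Option.some.inj (h2.symm.trans hdg)
          obtain ⟨a, b⟩ := p
          simp only at hpk h3
          rw [hpk, h3]
        have hd' : d.insert url w = d := by
          apply PySem.Dict.ext
          rw [PySem.Dict.items_insert_of_contains d w hdc]
          exact pvReplace_id d.items url w hduniq
        have hA : pvStepA (banned, d) row = (banned, d) := by
          simp [pvStepA, hpr, hdc, hdgd, hbf, hd']
        have hB : pvStepB m row = m := by
          simp [pvStepB, hpr, PySem.Dict.modify, hgd, hm']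
        rw [hA, hB]
        exact ⟨hnd, hne, hban, hd⟩
      · -- a second distinct wid: A pops and bans, B's set grows to size 2
        have hw' : wid ≠ w := fun hcon => hw hcon.symm
        have haddw : PySem.Set.add [w] wid = [w, wid] := by
          simp [PySem.Set.add, PySem.Set.contains, hw']
        have hA : pvStepA (banned, d) row = (PySem.Set.add banned url, d.erase url) := by
          simp [pvStepA, hpr, hdc, hdgd, hw]
        have hB : pvStepB m row = m.insert url [w, wid] := by
          simp [pvStepB, hpr, PySem.Dict.modify, hgd, haddw]
        rw [hA, hB]
        have hm'items : (m.insert url [w, wid]).items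
            = m.items.map (fun p => if p.1 == url then (url, [w, wid]) else p) :=
          PySem.Dict.items_insert_of_contains m [w, wid] hmc
        refine ⟨PySem.Dict.nodup_keys_insert m url [w, wid] hnd, ?_, ?_, ?_⟩
        · intro p hp
          rw [hm'items] at hp
          obtain ⟨q, hq, hpq⟩ := List.mem_map.mp hp
          by_cases hqk : q.1 = url
          · rw [← hpq]; simp [hqk]
          · rw [← hpq]; simp [hqk]; exact hne q hq
        · intro u
          by_cases hu : u = url
          · subst hu
            constructor
            · intro _
              refine ⟨[w, wid], ?_, by simp⟩
              rw [PySem.Dict.get?_insert m u u [w, wid], if_pos rfl]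
            · intro _
              exact (PySem.Set.mem_add banned u u).mpr (Or.inr rfl)
          · rw [PySem.Set.mem_add banned url u,
              PySem.Dict.get?_insert_of_ne m [w, wid] hu]
            constructor
            · rintro (hub | hub)
              · exact (hban u).mp hub
              · exact absurd hub hu
            · intro hx
              exact Or.inl ((hban u).mpr hx)
        · have herase : (d.erase url).items = d.items.filter (fun q => !(q.1 == url)) := rfl
          rw [herase, hm'items,
            pvFilterMap_replace_none m.items url [w, wid] hndm
              (pvSel_none_of_two (by simp) url), hd]
    | w1 :: w2 :: rest, hsmem, hgd, hmuniq, hmu =>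
      -- url already banned: both sides leave their state unchanged
      have hlen2 : 2 ≤ (w1 :: w2 :: rest).length := by
        simp only [List.length_cons]; omega
      have hbt : url ∈ banned := (hban url).mpr ⟨_, hmu, hlen2⟩
      have hdnc : d.contains url = false := by
        rw [PySem.Dict.contains_eq_isSome_get?]
        cases hdg : d.get? url with
        | none => rfl
        | some v =>
          exfalso
          have hmem : (url, v) ∈ d.items := PySem.Dict.mem_items_of_get?_eq_some d hdg
          obtain ⟨p, hp, hpsel⟩ := List.mem_filterMap.mp (hd ▸ hmem)
          have hpk : p.1 = url := by rw [← pvSel_key hpsel]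
          have hpe := hmuniq p hp hpk
          rw [hpe] at hpsel
          rw [pvSel_none_of_two hlen2 url] at hpsel
          cases hpsel
      have hadd2 : 2 ≤ (PySem.Set.add (w1 :: w2 :: rest) wid).length := by
        simp only [PySem.Set.add]
        split
        · exact hlen2
        · simp only [List.length_append, List.length_cons]; omega
      have haddne : PySem.Set.add (w1 :: w2 :: rest) wid ≠ ([] : List String) := by
        intro hcon
        rw [hcon] at hadd2; simp at hadd2
      have hA : pvStepA (banned, d) row = (banned, d) := by
        simp [pvStepA, hpr, hdnc, hbt]
      have hB : pvStepB m row = m.insert url (PySem.Set.add (w1 :: w2 :: rest) wid) := by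
        simp [pvStepB, hpr, PySem.Dict.modify, hgd]
      rw [hA, hB]
      have hm'items : (m.insert url (PySem.Set.add (w1 :: w2 :: rest) wid)).items
          = m.items.map (fun p => if p.1 == url
              then (url, PySem.Set.add (w1 :: w2 :: rest) wid) else p) :=
        PySem.Dict.items_insert_of_contains m _ hmc
      refine ⟨PySem.Dict.nodup_keys_insert m url _ hnd, ?_, ?_, ?_⟩
      · intro p hp
        rw [hm'items] at hp
        obtain ⟨q, hq, hpq⟩ := List.mem_map.mp hp
        by_cases hqk : q.1 = url
        · rw [← hpq]; simp only [hqk]; simp [haddne]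
        · rw [← hpq]; simp [hqk]; exact hne q hq
      · intro u
        by_cases hu : u = url
        · subst hu
          constructor
          · intro _
            refine ⟨_, ?_, hadd2⟩
            rw [PySem.Dict.get?_insert m u u _, if_pos rfl]
          · intro _; exact hbt
        · rw [PySem.Dict.get?_insert_of_ne m _ hu]
          exact hban u
      · rw [hm'items,
          pvFilterMap_replace_none m.items url _ hndm (pvSel_none_of_two hadd2 url), hd]
        exact (pvFilter_noop _ url (hd ▸ pvNoKey d url hdnc)).symm

lemma pvFold_inv (rows : List String) (banned : PySem.Set String)
    (d : PySem.Dict String String) (m : PySem.Dict String (PySem.Set String))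
    (h : pvInv banned d m) :
    pvInv (rows.foldl pvStepA (banned, d)).1 (rows.foldl pvStepA (banned, d)).2
      (rows.foldl pvStepB m) := by
  induction rows generalizing banned d m with
  | nil => simpa using h
  | cons r t ih =>
    have h1 := pvStep_inv banned d m r h
    have h2 := ih (pvStepA (banned, d) r).1 (pvStepA (banned, d) r).2 (pvStepB m r)
      (by simpa using h1)
    simpa using h2

-- ===== VERDICT (by name: the statement is the Claim_ definition above) =====
theorem map_url_to_wid_spec : Claim_equal_map_url_to_wid := by
  intro l _
  unfold Spec_map_url_to_wid map_url_to_wid map_url_to_wid_alt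
  have h0 : pvInv PySem.Set.empty PySem.Dict.empty PySem.Dict.empty := by
    unfold pvInv
    refine ⟨PySem.Dict.nodup_keys_empty, ?_, ?_, rfl⟩
    · intro p hp
      exact absurd hp (by simp [PySem.Dict.empty])
    · intro u
      constructor
      · intro hu
        exact absurd hu (by simp [PySem.Set.empty])
      · rintro ⟨s, hs, -⟩
        rw [PySem.Dict.get?_empty] at hs; cases hs
  have h := pvFold_inv l PySem.Set.empty PySem.Dict.empty PySem.Dict.empty h0
  exact h.2.2.2
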